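-- pv_equiv track=rewrite | github.com/SubayinH/BLM230-HammingSimulator | hamming_kodu_projesi.py | hamming_kodu_olustur
-- ===== SOURCE A (Python) =====
-- def parite_bitleri_sayisini_hesapla(veri_bit_uzunlugu):
--     r = 0
--     while (2 ** r) < (veri_bit_uzunlugu + r + 1):
--         r += 1
--     return r
--
-- def hamming_kodu_olustur(veri_bitleri):
--     m = len(veri_bitleri)
--     r = parite_bitleri_sayisini_hesapla(m)
--     toplam_uzunluk = m + r
--
--     hamming_kodu = ['0'] * toplam_uzunluk
--
--     # Veri bitlerini uygun konumlara yerleştir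
--     j = 0
--     for i in range(1, toplam_uzunluk + 1):
--         if (i & (i - 1)) == 0:
--             continue
--         hamming_kodu[i - 1] = veri_bitleri[j]
--         j += 1
--
--     # Parite bitlerini hesapla
--     for i in range(r):
--         parite_konumu = 2 ** i
--         parite_toplami = 0
--         for j in range(1, toplam_uzunluk + 1):
--             if j & parite_konumu:
--                 parite_toplami += int(hamming_kodu[j - 1])
--         hamming_kodu[parite_konumu - 1] = str(parite_toplami % 2)
--
--     return ''.join(hamming_kodu)
-- ===== SOURCE B (Python) =====
-- def parite_bitleri_sayisini_hesapla(veri_bit_uzunlugu):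
--     r = 0
--     while (2 ** r) < (veri_bit_uzunlugu + r + 1):
--         r += 1
--     return r
--
-- def hamming_kodu_olustur(veri_bitleri):
--     # Single distributing pass: each data bit's value is added to every parity
--     # accumulator whose index bit is set in its position, instead of r full scans.
--     m = len(veri_bitleri)
--     r = parite_bitleri_sayisini_hesapla(m)
--     n = m + r
--     kod = ['0'] * n
--     acc = [0] * r
--     j = 0
--     for p in range(1, n + 1):
--         if p & (p - 1):
--             kod[p - 1] = veri_bitleri[j]
--             v = int(veri_bitleri[j])
--             j += 1
--             for i in range(r):
--                 if (p >> i) & 1: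
--                     acc[i] += v
--     for i in range(r):
--         kod[2 ** i - 1] = str(acc[i] % 2)
--     return ''.join(kod)
-- ===== Notes on version B (the rewrite author's own statement) =====
-- stated objective: alternative
-- what changed: Replaces the r separate full scans of the code word (one per parity bit) by a single distributing pass over the data positions that adds each data bit's value to every parity accumulator whose index bit is set, then writes all parity bits at the end.
import Mathlib
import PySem

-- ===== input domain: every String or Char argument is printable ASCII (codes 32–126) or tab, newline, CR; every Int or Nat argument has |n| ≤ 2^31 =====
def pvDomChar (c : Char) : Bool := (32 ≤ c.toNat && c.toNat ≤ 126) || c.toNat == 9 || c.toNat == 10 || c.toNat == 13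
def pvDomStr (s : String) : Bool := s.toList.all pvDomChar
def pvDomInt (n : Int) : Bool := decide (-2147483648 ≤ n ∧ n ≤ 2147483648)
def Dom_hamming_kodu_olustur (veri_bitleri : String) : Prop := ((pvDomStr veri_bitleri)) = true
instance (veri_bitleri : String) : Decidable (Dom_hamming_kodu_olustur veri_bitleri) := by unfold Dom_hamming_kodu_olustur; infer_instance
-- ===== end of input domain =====

-- B replaces A's r separate per-parity scans of the code word by one distributing pass over the
-- data positions (each data bit is added to every parity accumulator whose index bit is set);
-- alternative decomposition, same asymptotic cost.

-- ===== PORT A =====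
-- the while-loop of parite_bitleri_sayisini_hesapla: r += 1 while 2**r < m + r + 1
def pariteLoop (m r : Nat) : Nat :=
  if 2 ^ r < m + r + 1 then pariteLoop m (r + 1) else r
termination_by m + 1 - r
decreasing_by
  rename_i h
  have h2 : 2 * r ≤ 2 ^ r := by
    rcases Nat.eq_zero_or_pos r with h0 | h0
    · simp [h0]
    · have hlt : r - 1 < 2 ^ (r - 1) := Nat.lt_two_pow_self
      have e : 2 ^ r = 2 ^ (r - 1) * 2 := by
        have hr : r - 1 + 1 = r := by omega
        rw [← pow_succ, hr]
      omega
  omega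

def parite_bitleri_sayisini_hesapla (veri_bit_uzunlugu : Nat) : Nat :=
  pariteLoop veri_bit_uzunlugu 0

-- int(c) for a stored one-character cell (guard `.getD 0` is only the totalisation of ValueError,
-- excluded by Pre_)
def charInt (c : Char) : Int := (PySem.Int.ofStr? (String.ofList [c])).getD 0

-- str(v) for the one-digit value v = parity sum % 2, as the single character it joins as
def pyStr1 (v : Int) : Char := (PySem.Int.toStr v).toList.headD '0'

-- data-bit placement loop of A: state (hamming_kodu, j)
def placeStepA (veri : String) : List Char × Nat → Nat → List Char × Nat :=
  fun st t =>
    let i := t + 1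
    if i &&& (i - 1) == 0 then st
    else (st.1.set (i - 1) ((PySem.Str.pyGet? veri (st.2 : Int)).getD '0'), st.2 + 1)

-- inner parity scan of A: for j in range(1, n+1): if j & pk: s += int(kod[j-1])
def scanStep (kod : List Char) (pk : Nat) : Int → Nat → Int :=
  fun s t =>
    let j := t + 1
    if j &&& pk != 0 then s + charInt (kod.getD (j - 1) '0') else s

-- outer parity loop body of A
def parityStepA (n : Nat) : List Char → Nat → List Char :=
  fun kod i =>
    let pk := 2 ^ i
    let s := (List.range n).foldl (scanStep kod pk) 0
    kod.set (pk - 1) (pyStr1 (PySem.Int.mod s 2))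

def hamming_kodu_olustur (veri_bitleri : String) : String :=
  let m := veri_bitleri.toList.length
  let r := parite_bitleri_sayisini_hesapla m
  let n := m + r
  let placed := (List.range n).foldl (placeStepA veri_bitleri) (List.replicate n '0', 0)
  String.ofList ((List.range r).foldl (parityStepA n) placed.1)

-- ===== PORT B =====
-- distribute one data bit's value v at position p into every parity accumulator whose index bit is set
def accStep (v : Int) (p : Nat) : List Int → Nat → List Int :=
  fun a i => if (p >>> i) &&& 1 != 0 then a.set i (a.getD i 0 + v) else a

-- single placement-and-distribution pass of B: state (kod, acc, j)
def placeStepB (veri : String) (r : Nat) : List Char × List Int × Nat → Nat → List Char × List Int × Nat :=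
  fun st t =>
    let p := t + 1
    if p &&& (p - 1) != 0 then
      let c := (PySem.Str.pyGet? veri (st.2.2 : Int)).getD '0'
      let v := charInt c
      (st.1.set (p - 1) c, (List.range r).foldl (accStep v p) st.2.1, st.2.2 + 1)
    else st

-- final parity write of B
def writeStep (acc : List Int) : List Char → Nat → List Char :=
  fun kod i => kod.set (2 ^ i - 1) (pyStr1 (PySem.Int.mod (acc.getD i 0) 2))

def hamming_kodu_olustur_alt (veri_bitleri : String) : String :=
  let m := veri_bitleri.toList.length
  let r := parite_bitleri_sayisini_hesapla m
  let n := m + r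
  let st := (List.range n).foldl (placeStepB veri_bitleri r)
      (List.replicate n '0', List.replicate r 0, 0)
  String.ofList ((List.range r).foldl (writeStep st.2.1) st.1)

-- ===== PRECONDITION & SPEC =====
-- Pre_ excludes exactly the inputs on which A raises ValueError: a character that is not an
-- ASCII digit makes int() fail (B raises there too).
def Pre_hamming_kodu_olustur (veri_bitleri : String) : Prop :=
  veri_bitleri.toList.all (fun c => c.isDigit) = true
instance (veri_bitleri : String) : Decidable (Pre_hamming_kodu_olustur veri_bitleri) := by
  unfold Pre_hamming_kodu_olustur; infer_instance

def pvWitness_hamming_kodu_olustur : String := "101"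

def Spec_hamming_kodu_olustur (veri_bitleri : String) (out : String) : Prop := out = hamming_kodu_olustur_alt veri_bitleri
instance (veri_bitleri : String) (out : String) : Decidable (Spec_hamming_kodu_olustur veri_bitleri out) := by unfold Spec_hamming_kodu_olustur; infer_instance

-- ===== CLAIM (what is proved, stated in full; the proofs are below) =====
def Claim_equal_hamming_kodu_olustur : Prop := ∀ (veri_bitleri : String), Dom_hamming_kodu_olustur veri_bitleri → Pre_hamming_kodu_olustur veri_bitleri → Spec_hamming_kodu_olustur veri_bitleri (hamming_kodu_olustur veri_bitleri)

-- ===== LEMMAS AND PROOFS =====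

-- partial parity sum over positions 1..u (A's inner scan, cut at u)
def scan (kod : List Char) (pk u : Nat) : Int := (List.range u).foldl (scanStep kod pk) 0

theorem charInt_zero : charInt '0' = 0 := by decide

theorem bit_iff (j i : Nat) : (j &&& 2 ^ i = 0) ↔ ((j >>> i) &&& 1 = 0) := by
  rw [Nat.and_two_pow, Nat.and_comm (j >>> i) 1]
  have hdef : Nat.testBit j i = (1 &&& (j >>> i) != 0) := rfl
  rcases hb : j.testBit i with _ | _ <;> rw [hdef] at hb <;> simp at hb <;>
    simp [hb, Nat.pos_iff_ne_zero, Nat.pow_pos]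

theorem scan_succ (kod : List Char) (pk u : Nat) :
    scan kod pk (u + 1) = scanStep kod pk (scan kod pk u) u := by
  unfold scan
  rw [List.range_succ, List.foldl_append]
  rfl

-- entries below u are unaffected by a write at u
theorem scan_set_ge (kod : List Char) (c : Char) (pk u idx : Nat) (h : u ≤ idx) :
    scan (kod.set idx c) pk u = scan kod pk u := by
  induction u with
  | zero => rfl
  | succ u ih =>
    rw [scan_succ, scan_succ, ih (by omega)]
    unfold scanStep
    simp only [Nat.add_sub_cancel, List.getD_eq_getElem?_getD,
      List.getElem?_set_ne (by omega : idx ≠ u)]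

-- scans agree when the lists agree at every position the parity mask selects
theorem scan_congr (kod1 kod2 : List Char) (pk u : Nat)
    (h : ∀ t, t < u → (t + 1) &&& pk ≠ 0 → kod1.getD t '0' = kod2.getD t '0') :
    scan kod1 pk u = scan kod2 pk u := by
  induction u with
  | zero => rfl
  | succ u ih =>
    rw [scan_succ, scan_succ, ih (fun t ht => h t (by omega))]
    unfold scanStep
    by_cases hc : (u + 1) &&& pk = 0
    · simp [hc]
    · simp only [Nat.add_sub_cancel, h u (by omega) hc]

-- the two placement folds produce the same code list and data index
theorem place_fst_eq (veri : String) (r : Nat) :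
    ∀ (ts : List Nat) (kod : List Char) (acc : List Int) (j : Nat),
      (ts.foldl (placeStepB veri r) (kod, acc, j)).1 = (ts.foldl (placeStepA veri) (kod, j)).1 := by
  intro ts
  induction ts with
  | nil => intro kod acc j; rfl
  | cons t ts ih =>
    intro kod acc j
    simp only [List.foldl_cons]
    by_cases hc : (t + 1) &&& (t + 1 - 1) = 0
    · simp only [placeStepA, placeStepB, hc]
      simp [ih]
    · simp only [placeStepA, placeStepB]
      simp only [bne_iff_ne, ne_eq, hc, not_false_iff, if_pos, beq_iff_eq]
      simp [ih]

theorem accfold_length (v : Int) (p : Nat) (R : Nat) (a : List Int) :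
    ((List.range R).foldl (accStep v p) a).length = a.length := by
  induction R with
  | zero => rfl
  | succ R ih =>
    rw [List.range_succ, List.foldl_append]
    simp only [List.foldl_cons, List.foldl_nil, accStep]
    split <;> simp [ih]

-- per-index effect of the accumulator-distribution fold
theorem accfold_getD (v : Int) (p : Nat) :
    ∀ (R : Nat) (a : List Int) (i : Nat), R ≤ a.length →
      ((List.range R).foldl (accStep v p) a).getD i 0 =
        if i < R ∧ (p >>> i) &&& 1 ≠ 0 then a.getD i 0 + v else a.getD i 0 := by
  intro R
  induction R with
  | zero => intro a i _; simp
  | succ R ih =>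
    intro a i hR
    rw [List.range_succ, List.foldl_append]
    simp only [List.foldl_cons, List.foldl_nil]
    have hlen : ((List.range R).foldl (accStep v p) a).length = a.length :=
      accfold_length v p R a
    have hpre : ∀ k, ((List.range R).foldl (accStep v p) a).getD k 0 =
        if k < R ∧ (p >>> k) &&& 1 ≠ 0 then a.getD k 0 + v else a.getD k 0 :=
      fun k => ih a k (by omega)
    rw [show ∀ b : List Int, accStep v p b R =
        if (p >>> R) &&& 1 ≠ 0 then b.set R (b.getD R 0 + v) else b from by
      intro b; unfold accStep; by_cases h : (p >>> R) &&& 1 = 0 <;> simp [h]]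
    by_cases hbit : (p >>> R) &&& 1 = 0
    · rw [if_neg (by simp [hbit]), hpre i]
      by_cases hiR : i = R
      · subst hiR
        rw [if_neg (fun h => absurd h.1 (by omega)), if_neg (fun h => h.2 hbit)]
      · by_cases hc : (p >>> i) &&& 1 = 0
        · rw [if_neg (fun h => h.2 hc), if_neg (fun h => h.2 hc)]
        · by_cases hlt : i < R
          · rw [if_pos ⟨hlt, hc⟩, if_pos ⟨by omega, hc⟩]
          · rw [if_neg (fun h => hlt h.1), if_neg (fun h => hlt (by omega))]
    · rw [if_pos hbit]
      by_cases hiR : i = R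
      · subst hiR
        rw [List.getD_eq_getElem?_getD, List.getElem?_set_self (by omega)]
        simp only [Option.getD_some]
        rw [hpre i, if_neg (fun h => absurd h.1 (by omega)), if_pos ⟨by omega, hbit⟩]
      · rw [List.getD_eq_getElem?_getD, List.getElem?_set_ne (by omega),
          ← List.getD_eq_getElem?_getD, hpre i]
        by_cases hc : (p >>> i) &&& 1 = 0
        · rw [if_neg (fun h => h.2 hc), if_neg (fun h => h.2 hc)]
        · by_cases hlt : i < R
          · rw [if_pos ⟨hlt, hc⟩, if_pos ⟨by omega, hc⟩]
          · rw [if_neg (fun h => hlt h.1), if_neg (fun h => hlt (by omega))]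


-- the placement invariant: length, zeros at the skipped (parity) positions, and the
-- accumulators equal to the partial parity scans of the current code list
def stB (veri : String) (r n u : Nat) : List Char × List Int × Nat :=
  (List.range u).foldl (placeStepB veri r) (List.replicate n '0', List.replicate r 0, 0)

theorem place_inv (veri : String) (r n : Nat) :
    ∀ u, u ≤ n →
      (stB veri r n u).1.length = n ∧
      (∀ t, t < n → (t + 1) &&& t = 0 → (stB veri r n u).1.getD t '0' = '0') ∧
      (stB veri r n u).2.1.length = r ∧
      (∀ i, i < r → (stB veri r n u).2.1.getD i 0 = scan (stB veri r n u).1 (2 ^ i) u) := by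
  intro u
  induction u with
  | zero =>
    intro _
    refine ⟨by simp [stB], ?_, by simp [stB], ?_⟩
    · intro t ht _
      simp [stB, List.getD_eq_getElem?_getD, ht]
    · intro i hi
      simp [stB, scan, List.getD_eq_getElem?_getD, hi]
  | succ u ih =>
    intro hu
    obtain ⟨h1, h2, h3, h4⟩ := ih (by omega)
    have hstep : stB veri r n (u + 1) = placeStepB veri r (stB veri r n u) u := by
      unfold stB; rw [List.range_succ, List.foldl_append]; rfl
    set st := stB veri r n u with hst
    by_cases hc : (u + 1) &&& u = 0
    · have hskip : placeStepB veri r st u = st := by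
        unfold placeStepB; simp [hc]
      rw [hstep, hskip]
      refine ⟨h1, h2, h3, ?_⟩
      intro i hi
      rw [h4 i hi, scan_succ]
      unfold scanStep
      simp only [Nat.add_sub_cancel]
      by_cases hb : (u + 1) &&& 2 ^ i = 0
      · rw [if_neg (by simpa using hb)]
      · have hz : st.1.getD u '0' = '0' := h2 u (by omega) hc
        rw [if_pos (by simpa using hb), hz, charInt_zero, add_zero]
    · have hwrite : placeStepB veri r st u =
          (st.1.set u ((PySem.Str.pyGet? veri (st.2.2 : Int)).getD '0'),
           (List.range r).foldl
             (accStep (charInt ((PySem.Str.pyGet? veri (st.2.2 : Int)).getD '0')) (u + 1)) st.2.1,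
           st.2.2 + 1) := by
        unfold placeStepB; simp [hc]
      rw [hstep, hwrite]
      set c := (PySem.Str.pyGet? veri (st.2.2 : Int)).getD '0' with hcdef
      refine ⟨by simp [h1], ?_, by rw [accfold_length, h3], ?_⟩
      · intro t ht hzt
        have htu : t ≠ u := fun he => hc (he ▸ hzt)
        rw [List.getD_eq_getElem?_getD, List.getElem?_set_ne (by omega),
          ← List.getD_eq_getElem?_getD]
        exact h2 t ht hzt
      · intro i hi
        rw [accfold_getD (charInt c) (u + 1) r st.2.1 i (by omega), scan_succ,
          scan_set_ge st.1 c (2 ^ i) u u (le_refl u)]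
        unfold scanStep
        simp only [Nat.add_sub_cancel]
        have hcset : (st.1.set u c).getD u '0' = c := by
          rw [List.getD_eq_getElem?_getD, List.getElem?_set_self (by omega)]; rfl
        rw [hcset, h4 i hi]
        by_cases hb : ((u + 1) >>> i) &&& 1 = 0
        · rw [if_neg (fun h => h.2 hb)]
          have hb2 : (u + 1) &&& 2 ^ i = 0 := (bit_iff (u + 1) i).mpr hb
          rw [if_neg (by simpa using hb2)]
        · rw [if_pos ⟨hi, hb⟩]
          have hb2 : ¬ (u + 1) &&& 2 ^ i = 0 := fun h0 => hb ((bit_iff (u + 1) i).mp h0)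
          rw [if_pos (by simpa using hb2)]

theorem parityStepA_eq (n : Nat) (kod : List Char) (i : Nat) :
    parityStepA n kod i = kod.set (2 ^ i - 1) (pyStr1 (PySem.Int.mod (scan kod (2 ^ i) n) 2)) := rfl

-- A's parity loop equals B's write loop, given the accumulators name the scans of K
theorem parity_fold_eq (n r : Nat) (K : List Char) (acc : List Int)
    (hacc : ∀ i, i < r → acc.getD i 0 = scan K (2 ^ i) n) :
    ∀ k, k ≤ r →
      (List.range k).foldl (parityStepA n) K = (List.range k).foldl (writeStep acc) K ∧
      (∀ t, (∀ j, j < k → t ≠ 2 ^ j - 1) →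
        ((List.range k).foldl (parityStepA n) K).getD t '0' = K.getD t '0') := by
  intro k
  induction k with
  | zero => intro _; exact ⟨rfl, fun t _ => rfl⟩
  | succ k ih =>
    intro hk
    obtain ⟨hEq, hAgree⟩ := ih (by omega)
    have hscan : scan ((List.range k).foldl (parityStepA n) K) (2 ^ k) n = scan K (2 ^ k) n := by
      apply scan_congr
      intro t ht hbt
      apply hAgree
      intro j hj he
      apply hbt
      have hpos : 0 < 2 ^ j := Nat.two_pow_pos j
      have hto : t + 1 = 2 ^ j := by omega
      rw [hto, Nat.and_two_pow, Nat.testBit_two_pow_of_ne (by omega : j ≠ k)]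
      simp
    constructor
    · rw [List.range_succ, List.foldl_append, List.foldl_append]
      simp only [List.foldl_cons, List.foldl_nil]
      rw [hEq] at hscan ⊢
      rw [parityStepA_eq, hscan, ← hacc k (by omega)]
      rfl
    · intro t hdist
      rw [List.range_succ, List.foldl_append]
      simp only [List.foldl_cons, List.foldl_nil]
      rw [parityStepA_eq]
      have hne : t ≠ 2 ^ k - 1 := hdist k (by omega)
      rw [List.getD_eq_getElem?_getD, List.getElem?_set_ne (by omega),
        ← List.getD_eq_getElem?_getD]
      exact hAgree t (fun j hj => hdist j (by omega))

-- ===== VERDICT (by name: the statement is the Claim_ definition above) =====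
theorem hamming_kodu_olustur_spec : Claim_equal_hamming_kodu_olustur := by
  intro veri _ _
  unfold Spec_hamming_kodu_olustur
  simp only [hamming_kodu_olustur, hamming_kodu_olustur_alt]
  set m := veri.toList.length with hm
  set r := parite_bitleri_sayisini_hesapla m with hr
  set n := m + r with hn
  have hstB : (List.range n).foldl (placeStepB veri r)
      (List.replicate n '0', List.replicate r 0, 0) = stB veri r n n := rfl
  rw [hstB]
  obtain ⟨h1, h2, h3, h4⟩ := place_inv veri r n n (le_refl n)
  have hfst : (stB veri r n n).1 =
      ((List.range n).foldl (placeStepA veri) (List.replicate n '0', 0)).1 :=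
    place_fst_eq veri r (List.range n) (List.replicate n '0') (List.replicate r 0) 0
  rw [← hfst]
  exact congrArg String.ofList
    ((parity_fold_eq n r (stB veri r n n).1 (stB veri r n n).2.1 h4 r (le_refl r)).1)
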